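-- pv_equiv track=rewrite | github.com/vinukaveesha/viper | scripts/jenkins_sync_inline_pipeline.py | patch_tracker_parameters
-- ===== SOURCE A (Python) =====
-- def patch_tracker_parameters(xml: str) -> str:
--     """Update or remove stale parameter-tracker references in config.xml."""
--     for old, new in [
--         ("SCM_PROVIDER", "SCM_PROVIDER_OVERRIDE"),
--         ("SCM_URL", "SCM_URL_OVERRIDE"),
--         ("LLM_PROVIDER", "LLM_PROVIDER_OVERRIDE"),
--     ]:
--         xml = xml.replace(f"<string>{old}</string>", f"<string>{new}</string>")
--     xml = xml.replace("<string>LLM_MODEL</string>", "")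
--     xml = xml.replace("<string>LLM_MODEL_OVERRIDE</string>", "")
--     return xml
-- ===== SOURCE B (Python) =====
-- _TABLE = {
--     "SCM_PROVIDER": "<string>SCM_PROVIDER_OVERRIDE</string>",
--     "SCM_URL": "<string>SCM_URL_OVERRIDE</string>",
--     "LLM_PROVIDER": "<string>LLM_PROVIDER_OVERRIDE</string>",
--     "LLM_MODEL": "",
--     "LLM_MODEL_OVERRIDE": "",
-- }
--
-- def patch_tracker_parameters(xml: str) -> str:
--     """Single left-to-right tokenizing scan: rewrite/drop known <string>NAME</string> tokens."""
--     out = []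
--     i = 0
--     n = len(xml)
--     while i < n:
--         if xml.startswith("<string>", i):
--             j = xml.find("<", i + 8)
--             if j != -1 and xml.startswith("</string>", j):
--                 name = xml[i + 8:j]
--                 if name in _TABLE:
--                     out.append(_TABLE[name])
--                     i = j + 9
--                     continue
--         out.append(xml[i])
--         i += 1
--     return "".join(out)
-- ===== Notes on version B (the rewrite author's own statement) =====
-- stated objective: alternative
-- what changed: A makes five sequential full-document str.replace passes (one per literal token); B makes a single left-to-right tokenizing scan that parses each string-token once and rewrites/drops it via a five-entry table.
import Mathlib
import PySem

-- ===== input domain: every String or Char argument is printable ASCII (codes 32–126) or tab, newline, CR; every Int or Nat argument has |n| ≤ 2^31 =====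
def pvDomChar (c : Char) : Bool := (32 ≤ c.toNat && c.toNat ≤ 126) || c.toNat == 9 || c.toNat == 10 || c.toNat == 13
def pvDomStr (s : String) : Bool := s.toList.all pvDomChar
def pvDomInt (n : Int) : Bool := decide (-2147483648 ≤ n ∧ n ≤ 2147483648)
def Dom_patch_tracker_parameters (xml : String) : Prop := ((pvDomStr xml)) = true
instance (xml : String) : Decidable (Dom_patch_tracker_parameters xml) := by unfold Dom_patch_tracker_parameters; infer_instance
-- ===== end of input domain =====

-- B replaces A's five sequential full-document str.replace passes by one left-to-right
-- tokenizing scan that parses each <string>NAME</string> token once and consults a table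
-- (objective: alternative single-pass algorithm; equal on Pre_, which excludes splice corners).

set_option maxRecDepth 100000


-- ===== PORT A =====
def patch_tracker_parameters (xml : String) : String :=
  let x1 := [("SCM_PROVIDER", "SCM_PROVIDER_OVERRIDE"),
             ("SCM_URL", "SCM_URL_OVERRIDE"),
             ("LLM_PROVIDER", "LLM_PROVIDER_OVERRIDE")].foldl
    (fun x p => PySem.Str.replace x ("<string>" ++ p.1 ++ "</string>")
                                    ("<string>" ++ p.2 ++ "</string>")) xml
  let x2 := PySem.Str.replace x1 "<string>LLM_MODEL</string>" ""
  PySem.Str.replace x2 "<string>LLM_MODEL_OVERRIDE</string>" ""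

-- ===== PORT B =====
-- the module-level _TABLE dict of Source B
def pvTable : PySem.Dict (List Char) (List Char) :=
  PySem.Dict.ofList
    [("SCM_PROVIDER".toList, "<string>SCM_PROVIDER_OVERRIDE</string>".toList),
     ("SCM_URL".toList, "<string>SCM_URL_OVERRIDE</string>".toList),
     ("LLM_PROVIDER".toList, "<string>LLM_PROVIDER_OVERRIDE</string>".toList),
     ("LLM_MODEL".toList, "".toList),
     ("LLM_MODEL_OVERRIDE".toList, "".toList)]

-- the while-loop of Source B as structural recursion over the remaining characters
def pvScan : List Char → List Char
  | [] => []
  | c :: cs =>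
    if "<string>".toList.isPrefixOf (c :: cs) then
      -- j = xml.find('<', i+8); the token closes iff that next '<' starts "</string>"
      let name := ((c :: cs).drop 8).takeWhile (· ≠ '<')
      let rest2 := ((c :: cs).drop 8).drop name.length
      if "</string>".toList.isPrefixOf rest2 then
        match PySem.Dict.get? pvTable name with
        | some rep => rep ++ pvScan (rest2.drop 9)
        | none => c :: pvScan cs
      else c :: pvScan cs
    else c :: pvScan cs
termination_by s => s.length
decreasing_by
  all_goals simp [List.length_drop]

def patch_tracker_parameters_alt (xml : String) : String :=
  String.ofList (pvScan xml.toList)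

-- ===== PRECONDITION & SPEC =====
def pvBad (k : Nat) : List Char :=
  "<string>LLM_MODEL_OVERRIDE</string>".toList.take k ++ "<string>LLM_MODEL</string>".toList

-- Pre_ excludes inputs that contain a nonempty proper prefix of "<string>LLM_MODEL_OVERRIDE</string>"
-- immediately followed by a complete LLM_MODEL string-token: there A's sequential passes may remove
-- an OVERRIDE token spliced together by the LLM_MODEL removal pass, while B's single scan leaves the
-- spliced text — on such overlapping malformed token fragments either result is defensible.
def Pre_patch_tracker_parameters (xml : String) : Prop :=
  ∀ k < 35, 1 ≤ k → ¬ (pvBad k <:+: xml.toList)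
instance (xml : String) : Decidable (Pre_patch_tracker_parameters xml) := by
  unfold Pre_patch_tracker_parameters; infer_instance

def pvWitness_patch_tracker_parameters : String :=
  "<x><string>LLM_MODEL</string></x>"

def Spec_patch_tracker_parameters (xml : String) (out : String) : Prop :=
  out = patch_tracker_parameters_alt xml
instance (xml : String) (out : String) : Decidable (Spec_patch_tracker_parameters xml out) := by
  unfold Spec_patch_tracker_parameters; infer_instance

-- ===== CLAIM (what is proved, stated in full; the proofs are below) =====
def Claim_equal_patch_tracker_parameters : Prop := ∀ (xml : String), Dom_patch_tracker_parameters xml → Pre_patch_tracker_parameters xml → Spec_patch_tracker_parameters xml (patch_tracker_parameters xml)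

-- ===== LEMMAS AND PROOFS =====

-- chars-level names for the five pattern literals and the three replacements
def pvL1 : List Char := "<string>SCM_PROVIDER</string>".toList
def pvL2 : List Char := "<string>SCM_URL</string>".toList
def pvL3 : List Char := "<string>LLM_PROVIDER</string>".toList
def pvL4 : List Char := "<string>LLM_MODEL</string>".toList
def pvL5 : List Char := "<string>LLM_MODEL_OVERRIDE</string>".toList
def pvR1 : List Char := "<string>SCM_PROVIDER_OVERRIDE</string>".toList
def pvR2 : List Char := "<string>SCM_URL_OVERRIDE</string>".toList
def pvR3 : List Char := "<string>LLM_PROVIDER_OVERRIDE</string>".toList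

-- A's five passes on the character level
def pvComp (cs : List Char) : List Char :=
  PySem.Chars.replace
    (PySem.Chars.replace
      (PySem.Chars.replace
        (PySem.Chars.replace
          (PySem.Chars.replace cs pvL1 pvR1) pvL2 pvR2) pvL3 pvR3) pvL4 []) pvL5 []

-- ---- basic equations for PySem.Chars.replace with a nonempty pattern ----

lemma pv_go_zero (old new l acc : List Char) :
    PySem.Chars.replace.go old new 0 l acc = acc.reverse ++ l := by
  cases l <;> simp [PySem.Chars.replace.go]

lemma pv_go_succ_nil (old new acc : List Char) (f : Nat) :
    PySem.Chars.replace.go old new (f+1) [] acc = acc.reverse := by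
  simp [PySem.Chars.replace.go]

lemma pv_go_succ_cons (old new acc t : List Char) (c : Char) (f : Nat) :
    PySem.Chars.replace.go old new (f+1) (c :: t) acc =
      if old.isPrefixOf (c :: t) then
        PySem.Chars.replace.go old new f ((c :: t).drop old.length) (new.reverse ++ acc)
      else PySem.Chars.replace.go old new f t (c :: acc) := by
  simp [PySem.Chars.replace.go]

lemma pv_go_spec (old new : List Char) (hold : old ≠ []) :
    ∀ f l acc, l.length ≤ f →
      PySem.Chars.replace.go old new f l acc =
        acc.reverse ++ PySem.Chars.replace.go old new l.length l [] := by
  intro f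
  induction f using Nat.strong_induction_on with
  | _ f ih =>
    match f with
    | 0 =>
      intro l acc hl
      have : l = [] := List.eq_nil_of_length_eq_zero (Nat.le_zero.mp hl)
      subst this; simp [pv_go_zero]
    | (f+1) =>
      intro l acc hl
      cases l with
      | nil => simp [pv_go_succ_nil, pv_go_zero]
      | cons c t =>
        have holdlen : 1 ≤ old.length := List.length_pos_iff.mpr hold
        have hlt : t.length ≤ f := by simpa using hl
        have hdl : ((c :: t).drop old.length).length ≤ t.length := by
          simp [List.length_drop]; omega
        rw [pv_go_succ_cons]
        rw [show (c :: t).length = t.length + 1 from rfl, pv_go_succ_cons]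
        by_cases hp : old.isPrefixOf (c :: t)
        · simp only [hp, if_pos]
          rw [ih f (by omega) _ _ (le_trans hdl hlt),
              ih t.length (by omega) _ _ hdl]
          simp
        · simp only [hp]
          rw [ih f (by omega) _ _ hlt, ih t.length (by omega) t [c] (le_refl _)]
          simp

lemma pv_replace_eq_go (old new s : List Char) (hold : old ≠ []) :
    PySem.Chars.replace s old new = PySem.Chars.replace.go old new s.length s [] := by
  simp [PySem.Chars.replace, List.isEmpty_iff, hold]

lemma pv_replace_nil (old new : List Char) (hold : old ≠ []) :
    PySem.Chars.replace [] old new = [] := by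
  simp [pv_replace_eq_go _ _ _ hold, pv_go_zero]

lemma pv_replace_pos (old new l : List Char) (hold : old ≠ []) (h : old.isPrefixOf l) :
    PySem.Chars.replace l old new = new ++ PySem.Chars.replace (l.drop old.length) old new := by
  have holdlen : 1 ≤ old.length := List.length_pos_iff.mpr hold
  cases l with
  | nil =>
    exfalso
    have := List.isPrefixOf_iff_prefix.mp h
    have := List.prefix_nil.mp this
    exact hold this
  | cons c t =>
    have hdl : ((c :: t).drop old.length).length ≤ t.length := by
      simp [List.length_drop]; omega
    rw [pv_replace_eq_go _ _ _ hold, pv_replace_eq_go _ _ _ hold]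
    rw [show (c :: t).length = t.length + 1 from rfl, pv_go_succ_cons]
    simp only [h, if_pos]
    rw [pv_go_spec _ _ hold t.length _ _ hdl]
    rw [List.length_drop]
    simp

lemma pv_replace_neg (old new t : List Char) (c : Char) (hold : old ≠ [])
    (h : ¬ old.isPrefixOf (c :: t)) :
    PySem.Chars.replace (c :: t) old new = c :: PySem.Chars.replace t old new := by
  rw [pv_replace_eq_go _ _ _ hold, pv_replace_eq_go _ _ _ hold]
  rw [show (c :: t).length = t.length + 1 from rfl, pv_go_succ_cons]
  simp only [h]
  rw [pv_go_spec _ _ hold t.length t [c] (le_refl _)]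
  simp

-- ---- "no pattern match starts inside the block" and the block-distribution lemma ----

-- boolean check: every nonempty suffix of `block` disagrees with `pat`
-- at some position lying inside both (so no match of `pat` starts inside `block`)
def pvMism : List Char → List Char → Bool
  | _, [] => false
  | [], _ => false
  | a :: as, b :: bs => (a != b) || pvMism as bs

def pvChk (pat : List Char) : List Char → Bool
  | [] => true
  | c :: rest => pvMism (c :: rest) pat && pvChk pat rest

lemma pv_mism_spec : ∀ u v : List Char, pvMism u v = true →
    ∃ k, k < u.length ∧ k < v.length ∧ u[k]? ≠ v[k]? := by
  intro u
  induction u with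
  | nil => intro v h; cases v <;> simp [pvMism] at h
  | cons a as ih =>
    intro v h
    cases v with
    | nil => simp [pvMism] at h
    | cons b bs =>
      simp only [pvMism, Bool.or_eq_true, bne_iff_ne] at h
      rcases h with h | h
      · exact ⟨0, by simp, by simp, by simpa using h⟩
      · obtain ⟨k, h1, h2, h3⟩ := ih bs h
        exact ⟨k+1, by simpa using h1, by simpa using h2, by simpa using h3⟩

lemma pv_not_prefix_of_mismatch (pat u z : List Char)
    (h : ∃ k, k < u.length ∧ k < pat.length ∧ u[k]? ≠ pat[k]?) :
    ¬ pat.isPrefixOf (u ++ z) := by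
  obtain ⟨k, hku, hkp, hne⟩ := h
  intro hpf
  have hpre := List.isPrefixOf_iff_prefix.mp hpf
  obtain ⟨r, hr⟩ := hpre
  apply hne
  have h1 : (u ++ z)[k]? = u[k]? := List.getElem?_append_left hku
  have h2 : (pat ++ r)[k]? = pat[k]? := List.getElem?_append_left hkp
  rw [← h1, ← hr, h2]

lemma pv_replace_block (old new : List Char) (hold : old ≠ []) :
    ∀ block, pvChk old block = true →
    ∀ z, PySem.Chars.replace (block ++ z) old new = block ++ PySem.Chars.replace z old new := by
  intro block
  induction block with
  | nil => intro _ z; simp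
  | cons c b ih =>
    intro hnm z
    simp only [pvChk, Bool.and_eq_true] at hnm
    have hnp : ¬ old.isPrefixOf ((c :: b) ++ z) :=
      pv_not_prefix_of_mismatch old (c :: b) z (pv_mism_spec _ _ hnm.1)
    rw [show (c :: b) ++ z = c :: (b ++ z) from rfl] at hnp ⊢
    rw [pv_replace_neg _ _ _ _ hold hnp, ih hnm.2 z]
    simp

-- ---- fragment transfer: a pattern fragment visible in a pass's output was already
-- ---- visible in its input (for renames), or a splice point is exposed (for removals)

lemma pv_transfer (old new w : List Char) (hold : old ≠ [])
    (H : ∀ m < w.length, ∃ k, k < w.length - m ∧ k < new.length ∧ (w.drop m)[k]? ≠ new[k]?) :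
    ∀ n l m, l.length ≤ n → m ≤ w.length →
      (w.drop m).isPrefixOf (PySem.Chars.replace l old new) →
      (w.drop m).isPrefixOf l := by
  intro n
  induction n with
  | zero =>
    intro l m hln hm h
    have : l = [] := List.eq_nil_of_length_eq_zero (Nat.le_zero.mp hln)
    subst this
    rwa [pv_replace_nil _ _ hold] at h
  | succ n ih =>
    intro l m hln hm h
    by_cases hmw : m = w.length
    · subst hmw; simp [List.drop_length]
    have hmlt : m < w.length := lt_of_le_of_ne hm hmw
    cases l with
    | nil => rwa [pv_replace_nil _ _ hold] at h
    | cons c t =>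
      by_cases hp : old.isPrefixOf (c :: t)
      · exfalso
        rw [pv_replace_pos _ _ _ hold hp] at h
        obtain ⟨k, hk1, hk2, hk3⟩ := H m hmlt
        apply hk3
        obtain ⟨r, hr⟩ := List.isPrefixOf_iff_prefix.mp h
        have hku : k < (w.drop m).length := by simp [List.length_drop]; omega
        have h1 : ((w.drop m) ++ r)[k]? = (w.drop m)[k]? := List.getElem?_append_left hku
        have h2 : (new ++ PySem.Chars.replace ((c :: t).drop old.length) old new)[k]? = new[k]? :=
          List.getElem?_append_left hk2
        rw [← h1, hr, h2]
      · rw [pv_replace_neg _ _ _ _ hold hp] at h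
        rw [List.drop_eq_getElem_cons hmlt] at h ⊢
        rw [List.isPrefixOf_iff_prefix] at h ⊢
        rw [List.cons_prefix_cons] at h ⊢
        obtain ⟨hc, h'⟩ := h
        refine ⟨hc, ?_⟩
        exact List.isPrefixOf_iff_prefix.mp
          (ih t (m+1) (by simpa using hln) (by omega) (List.isPrefixOf_iff_prefix.mpr h'))

lemma pv_transfer_rem (old w : List Char) (hold : old ≠ []) :
    ∀ n l m, l.length ≤ n → m ≤ w.length →
      (w.drop m).isPrefixOf (PySem.Chars.replace l old []) →
      (w.drop m).isPrefixOf l ∨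
        ∃ t, m + t < w.length ∧ ((w.drop m).take t ++ old).isPrefixOf l := by
  intro n
  induction n with
  | zero =>
    intro l m hln hm h
    have : l = [] := List.eq_nil_of_length_eq_zero (Nat.le_zero.mp hln)
    subst this
    rw [pv_replace_nil _ _ hold] at h
    exact Or.inl h
  | succ n ih =>
    intro l m hln hm h
    by_cases hmw : m = w.length
    · subst hmw; left; simp [List.drop_length]
    have hmlt : m < w.length := lt_of_le_of_ne hm hmw
    cases l with
    | nil => rw [pv_replace_nil _ _ hold] at h; exact Or.inl h
    | cons c t =>
      by_cases hp : old.isPrefixOf (c :: t)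
      · right
        exact ⟨0, by omega, by simpa using hp⟩
      · rw [pv_replace_neg _ _ _ _ hold hp] at h
        rw [List.drop_eq_getElem_cons hmlt] at h
        rw [List.isPrefixOf_iff_prefix, List.cons_prefix_cons] at h
        obtain ⟨hc, h'⟩ := h
        rcases ih t (m+1) (by simpa using hln) (by omega)
            (List.isPrefixOf_iff_prefix.mpr h') with h2 | ⟨t', ht1, ht2⟩
        · left
          rw [List.drop_eq_getElem_cons hmlt, List.isPrefixOf_iff_prefix, List.cons_prefix_cons]
          exact ⟨hc, List.isPrefixOf_iff_prefix.mp h2⟩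
        · right
          refine ⟨t' + 1, by omega, ?_⟩
          have heq : List.take (t'+1) (List.drop m w) ++ old =
              w[m] :: (List.take t' (List.drop (m+1) w) ++ old) := by
            rw [List.drop_eq_getElem_cons hmlt, List.take_succ_cons]; simp
          rw [heq, List.isPrefixOf_iff_prefix, List.cons_prefix_cons]
          exact ⟨hc, List.isPrefixOf_iff_prefix.mp ht2⟩

-- pvChk also serves as pv_transfer's side condition, read suffix-wise
lemma pv_chk_spec : ∀ w : List Char, ∀ new : List Char, pvChk new w = true →
    ∀ m < w.length, ∃ k, k < w.length - m ∧ k < new.length ∧ (w.drop m)[k]? ≠ new[k]? := by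
  intro w
  induction w with
  | nil => intro new _ m hm; simp at hm
  | cons c rest ih =>
    intro new h m hm
    simp only [pvChk, Bool.and_eq_true] at h
    cases m with
    | zero =>
      obtain ⟨k, h1, h2, h3⟩ := pv_mism_spec _ _ h.1
      exact ⟨k, by simpa using h1, h2, by simpa using h3⟩
    | succ m =>
      obtain ⟨k, h1, h2, h3⟩ := ih new h.2 m (by simpa using hm)
      exact ⟨k, by simpa using h1, h2, by simpa using h3⟩

lemma pv_tr (old new w : List Char) (hold : old ≠ []) (H : pvChk new w = true)
    (l : List Char) (m : Nat) (hm : m ≤ w.length)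
    (h : (w.drop m).isPrefixOf (PySem.Chars.replace l old new)) :
    (w.drop m).isPrefixOf l := by
  refine pv_transfer old new w hold (fun m hm => ?_) l.length l m le_rfl hm h
  obtain ⟨k, h1, h2, h3⟩ := pv_chk_spec w new H m hm
  exact ⟨k, h1, h2, h3⟩

-- ---- the B-side scan equations ----

lemma pv_drop_length_takeWhile (p : Char → Bool) (l : List Char) :
    l.drop (l.takeWhile p).length = l.dropWhile p := by
  induction l with
  | nil => simp
  | cons a l ih =>
    by_cases h : p a <;> simp [h, ih]

lemma pv_scan_nil : pvScan [] = [] := by unfold pvScan; rfl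

lemma pv_scan_tok1 (z : List Char) : pvScan (pvL1 ++ z) = pvR1 ++ pvScan z := by
  rw [show pvL1 ++ z = '<' :: ("string>SCM_PROVIDER</string>".toList ++ z) from rfl]
  rw [pvScan]
  have hlk : PySem.Dict.get? pvTable ['S','C','M','_','P','R','O','V','I','D','E','R'] =
      some "<string>SCM_PROVIDER_OVERRIDE</string>".toList := by decide
  simp [List.takeWhile, hlk, pvR1]

lemma pv_scan_tok2 (z : List Char) : pvScan (pvL2 ++ z) = pvR2 ++ pvScan z := by
  rw [show pvL2 ++ z = '<' :: ("string>SCM_URL</string>".toList ++ z) from rfl]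
  rw [pvScan]
  have hlk : PySem.Dict.get? pvTable ['S','C','M','_','U','R','L'] =
      some "<string>SCM_URL_OVERRIDE</string>".toList := by decide
  simp [List.takeWhile, hlk, pvR2]

lemma pv_scan_tok3 (z : List Char) : pvScan (pvL3 ++ z) = pvR3 ++ pvScan z := by
  rw [show pvL3 ++ z = '<' :: ("string>LLM_PROVIDER</string>".toList ++ z) from rfl]
  rw [pvScan]
  have hlk : PySem.Dict.get? pvTable ['L','L','M','_','P','R','O','V','I','D','E','R'] =
      some "<string>LLM_PROVIDER_OVERRIDE</string>".toList := by decide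
  simp [List.takeWhile, hlk, pvR3]

lemma pv_scan_tok4 (z : List Char) : pvScan (pvL4 ++ z) = pvScan z := by
  rw [show pvL4 ++ z = '<' :: ("string>LLM_MODEL</string>".toList ++ z) from rfl]
  rw [pvScan]
  have hlk : PySem.Dict.get? pvTable ['L','L','M','_','M','O','D','E','L'] =
      some "".toList := by decide
  simp [List.takeWhile, hlk]

lemma pv_scan_tok5 (z : List Char) : pvScan (pvL5 ++ z) = pvScan z := by
  rw [show pvL5 ++ z = '<' :: ("string>LLM_MODEL_OVERRIDE</string>".toList ++ z) from rfl]
  rw [pvScan]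
  have hlk : PySem.Dict.get? pvTable
      ['L','L','M','_','M','O','D','E','L','_','O','V','E','R','R','I','D','E'] =
      some "".toList := by decide
  simp [List.takeWhile, hlk]

lemma pv_scan_neg (c : Char) (cs : List Char)
    (h1 : ¬ pvL1.isPrefixOf (c :: cs)) (h2 : ¬ pvL2.isPrefixOf (c :: cs))
    (h3 : ¬ pvL3.isPrefixOf (c :: cs)) (h4 : ¬ pvL4.isPrefixOf (c :: cs))
    (h5 : ¬ pvL5.isPrefixOf (c :: cs)) :
    pvScan (c :: cs) = c :: pvScan cs := by
  rw [pvScan]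
  dsimp only
  split
  case isFalse => rfl
  case isTrue hop =>
    split
    case isFalse => rfl
    case isTrue hcl =>
      set name : List Char := List.takeWhile (fun x => decide (x ≠ '<')) (List.drop 8 (c :: cs)) with hname
      cases hlk : pvTable.get? name with
      | none => rfl
      | some rep =>
        exfalso
        simp only [PySem.Dict.get?] at hlk
        rw [Option.map_eq_some_iff] at hlk
        obtain ⟨pr, hfind, hpr2⟩ := hlk
        have hmem := List.mem_of_find?_eq_some hfind
        have hkey : pr.1 = name := by
          have := List.find?_some hfind
          simpa using this
        have hs8 : c :: cs = "<string>".toList ++ List.drop 8 (c :: cs) := by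
          obtain ⟨r, hr⟩ := List.isPrefixOf_iff_prefix.mp hop
          conv_lhs => rw [← hr]
          simp [← hr]
        have hdw : List.drop 8 (c :: cs) =
            name ++ List.drop name.length (List.drop 8 (c :: cs)) := by
          rw [hname]
          rw [pv_drop_length_takeWhile]
          exact (List.takeWhile_append_dropWhile).symm
        set rest2 : List Char := List.drop name.length (List.drop 8 (c :: cs)) with hrest2
        have hcl' : rest2 = "</string>".toList ++ rest2.drop 9 := by
          obtain ⟨r, hr⟩ := List.isPrefixOf_iff_prefix.mp hcl
          conv_lhs => rw [← hr]
          simp [← hr]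
        have hdecomp : c :: cs =
            "<string>".toList ++ name ++ "</string>".toList ++ rest2.drop 9 := by
          conv_lhs => rw [hs8, hdw, hcl']
          simp
        have pfx : ∀ nm : List Char, name = nm →
            ("<string>".toList ++ nm ++ "</string>".toList).isPrefixOf (c :: cs) = true := by
          intro nm hnm
          rw [List.isPrefixOf_iff_prefix]
          refine ⟨rest2.drop 9, ?_⟩
          rw [hdecomp, hnm]
        have hnames : name = "SCM_PROVIDER".toList ∨ name = "SCM_URL".toList ∨
            name = "LLM_PROVIDER".toList ∨ name = "LLM_MODEL".toList ∨
            name = "LLM_MODEL_OVERRIDE".toList := by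
          have hitems : pvTable.items =
              [("SCM_PROVIDER".toList, "<string>SCM_PROVIDER_OVERRIDE</string>".toList),
               ("SCM_URL".toList, "<string>SCM_URL_OVERRIDE</string>".toList),
               ("LLM_PROVIDER".toList, "<string>LLM_PROVIDER_OVERRIDE</string>".toList),
               ("LLM_MODEL".toList, "".toList),
               ("LLM_MODEL_OVERRIDE".toList, "".toList)] := by decide
          rw [hitems] at hmem
          simp only [List.mem_cons, List.not_mem_nil, or_false] at hmem
          rcases hmem with h | h | h | h | h <;> rw [← hkey, h] <;> simp
        rcases hnames with hn | hn | hn | hn | hn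
        · exact h1 (by have := pfx _ hn; simpa [pvL1] using this)
        · exact h2 (by have := pfx _ hn; simpa [pvL2] using this)
        · exact h3 (by have := pfx _ hn; simpa [pvL3] using this)
        · exact h4 (by have := pfx _ hn; simpa [pvL4] using this)
        · exact h5 (by have := pfx _ hn; simpa [pvL5] using this)

-- ---- the invariant, the no-creation chain, and the main induction ----

def pvInv (cs : List Char) : Prop := ∀ k < 35, 1 ≤ k → ¬ (pvBad k <:+: cs)

lemma pv_inv_of_suffix {cs rest : List Char} (h : rest <:+ cs) (hI : pvInv cs) : pvInv rest := by
  intro k hk hk1 hin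
  exact hI k hk hk1 (hin.trans h.isInfix)

def pvFrag (t : Nat) : List Char := (pvL5.drop 1).take t ++ pvL4

lemma pv_H_frag : ∀ t < 34, pvChk pvR3 (pvFrag t) = true ∧ pvChk pvR2 (pvFrag t) = true ∧
    pvChk pvR1 (pvFrag t) = true := by
  decide

-- a prefix match of w cannot newly appear at the head after prepending c, unless it was there
lemma pv_no_create (w : List Char) (c : Char) (X cs : List Char)
    (htrans : (w.drop 1).isPrefixOf X → (w.drop 1).isPrefixOf cs)
    (horig : ¬ w.isPrefixOf (c :: cs)) (hnow : w.isPrefixOf (c :: X)) : False := by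
  cases w with
  | nil => exact horig (by simp)
  | cons w0 w' =>
    rw [List.isPrefixOf_iff_prefix, List.cons_prefix_cons] at hnow
    obtain ⟨hc, h'⟩ := hnow
    apply horig
    rw [List.isPrefixOf_iff_prefix, List.cons_prefix_cons]
    exact ⟨hc, List.isPrefixOf_iff_prefix.mp
      (htrans (List.isPrefixOf_iff_prefix.mpr h'))⟩

lemma pv_comp_cons (c : Char) (cs : List Char) (hInv : pvInv (c :: cs))
    (h1 : ¬ pvL1.isPrefixOf (c :: cs)) (h2 : ¬ pvL2.isPrefixOf (c :: cs))
    (h3 : ¬ pvL3.isPrefixOf (c :: cs)) (h4 : ¬ pvL4.isPrefixOf (c :: cs))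
    (h5 : ¬ pvL5.isPrefixOf (c :: cs)) :
    pvComp (c :: cs) = c :: pvComp cs := by
  have ne1 : pvL1 ≠ [] := by decide
  have ne2 : pvL2 ≠ [] := by decide
  have ne3 : pvL3 ≠ [] := by decide
  have ne4 : pvL4 ≠ [] := by decide
  have ne5 : pvL5 ≠ [] := by decide
  unfold pvComp
  set X1 := PySem.Chars.replace cs pvL1 pvR1 with hX1
  set X2 := PySem.Chars.replace X1 pvL2 pvR2 with hX2
  set X3 := PySem.Chars.replace X2 pvL3 pvR3 with hX3
  set X4 := PySem.Chars.replace X3 pvL4 [] with hX4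
  rw [pv_replace_neg _ _ _ _ ne1 h1]
  have hn2 : ¬ pvL2.isPrefixOf (c :: X1) := by
    intro h
    exact pv_no_create pvL2 c X1 cs
      (fun hx => pv_tr pvL1 pvR1 pvL2 ne1 (by decide) cs 1 (by decide) hx) h2 h
  rw [← hX1, pv_replace_neg _ _ _ _ ne2 hn2]
  have hn3 : ¬ pvL3.isPrefixOf (c :: X2) := by
    intro h
    refine pv_no_create pvL3 c X2 cs (fun hx => ?_) h3 h
    have hx1 := pv_tr pvL2 pvR2 pvL3 ne2 (by decide) X1 1 (by decide) hx
    exact pv_tr pvL1 pvR1 pvL3 ne1 (by decide) cs 1 (by decide) hx1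
  rw [← hX2, pv_replace_neg _ _ _ _ ne3 hn3]
  have hn4 : ¬ pvL4.isPrefixOf (c :: X3) := by
    intro h
    refine pv_no_create pvL4 c X3 cs (fun hx => ?_) h4 h
    have hx2 := pv_tr pvL3 pvR3 pvL4 ne3 (by decide) X2 1 (by decide) hx
    have hx1 := pv_tr pvL2 pvR2 pvL4 ne2 (by decide) X1 1 (by decide) hx2
    exact pv_tr pvL1 pvR1 pvL4 ne1 (by decide) cs 1 (by decide) hx1
  rw [← hX3, pv_replace_neg _ _ _ _ ne4 hn4]
  have hn5 : ¬ pvL5.isPrefixOf (c :: X4) := by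
    intro h
    rw [List.isPrefixOf_iff_prefix] at h
    rw [show pvL5 = '<' :: pvL5.drop 1 from rfl, List.cons_prefix_cons] at h
    obtain ⟨hc, h'⟩ := h
    rcases pv_transfer_rem pvL4 pvL5 ne4 X3.length X3 1 le_rfl (by decide)
        (List.isPrefixOf_iff_prefix.mpr h') with hA | ⟨t, ht, htp⟩
    · -- the fragment was already in cs: contradicts h5
      have hx2 := pv_tr pvL3 pvR3 pvL5 ne3 (by decide) X2 1 (by decide) hA
      have hx1 := pv_tr pvL2 pvR2 pvL5 ne2 (by decide) X1 1 (by decide) hx2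
      have hx0 := pv_tr pvL1 pvR1 pvL5 ne1 (by decide) cs 1 (by decide) hx1
      apply h5
      rw [List.isPrefixOf_iff_prefix,
        show pvL5 = '<' :: pvL5.drop 1 from rfl, List.cons_prefix_cons]
      exact ⟨hc, List.isPrefixOf_iff_prefix.mp hx0⟩
    · -- a splice pattern occurs in cs: contradicts the invariant
      have htlt : t < 34 := by
        have : pvL5.length = 35 := by decide
        omega
      have hfr : ((pvL5.drop 1).take t ++ pvL4) = pvFrag t := rfl
      rw [hfr] at htp
      have hHf := pv_H_frag t htlt
      have hw0 : ∀ l : List Char, (pvFrag t).isPrefixOf l →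
          ((pvFrag t).drop 0).isPrefixOf l := by intro l hl; simpa using hl
      have hx2 := pv_tr pvL3 pvR3 (pvFrag t) ne3 hHf.1 X2 0 (by omega) (by simpa using htp)
      have hx1 := pv_tr pvL2 pvR2 (pvFrag t) ne2 hHf.2.1 X1 0 (by omega) hx2
      have hx0 := pv_tr pvL1 pvR1 (pvFrag t) ne1 hHf.2.2 cs 0 (by omega) hx1
      -- assemble the bad pattern at the head of c :: cs
      have hbad : (pvBad (t+1)).isPrefixOf (c :: cs) := by
        have hsplit : pvBad (t+1) = '<' :: pvFrag t := by
          unfold pvBad pvFrag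
          rw [show "<string>LLM_MODEL_OVERRIDE</string>".toList =
              '<' :: pvL5.drop 1 from rfl]
          rw [List.take_succ_cons]
          simp [pvL4]
        rw [hsplit, List.isPrefixOf_iff_prefix, List.cons_prefix_cons]
        exact ⟨hc, List.isPrefixOf_iff_prefix.mp (by simpa using hx0)⟩
      exact hInv (t+1) (by omega) (by omega)
        ((List.isPrefixOf_iff_prefix.mp hbad).isInfix)
  rw [← hX4, pv_replace_neg _ _ _ _ ne5 hn5]

lemma pv_main : ∀ n cs, cs.length ≤ n → pvInv cs → pvComp cs = pvScan cs := by
  intro n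
  induction n with
  | zero =>
    intro cs hn _
    have : cs = [] := List.eq_nil_of_length_eq_zero (Nat.le_zero.mp hn)
    subst this
    rw [pv_scan_nil]
    unfold pvComp
    rw [pv_replace_nil _ _ (by decide : pvL1 ≠ []),
        pv_replace_nil _ _ (by decide : pvL2 ≠ []),
        pv_replace_nil _ _ (by decide : pvL3 ≠ []),
        pv_replace_nil _ _ (by decide : pvL4 ≠ []),
        pv_replace_nil _ _ (by decide : pvL5 ≠ [])]
  | succ n ih =>
    intro cs hn hInv
    cases cs with
    | nil =>
      rw [pv_scan_nil]
      unfold pvComp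
      rw [pv_replace_nil _ _ (by decide : pvL1 ≠ []),
          pv_replace_nil _ _ (by decide : pvL2 ≠ []),
          pv_replace_nil _ _ (by decide : pvL3 ≠ []),
          pv_replace_nil _ _ (by decide : pvL4 ≠ []),
          pv_replace_nil _ _ (by decide : pvL5 ≠ [])]
    | cons c t =>
      have ne1 : pvL1 ≠ [] := by decide
      have ne2 : pvL2 ≠ [] := by decide
      have ne3 : pvL3 ≠ [] := by decide
      have ne4 : pvL4 ≠ [] := by decide
      have ne5 : pvL5 ≠ [] := by decide
      by_cases hp1 : pvL1.isPrefixOf (c :: t)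
      · obtain ⟨r, hr⟩ := List.isPrefixOf_iff_prefix.mp hp1
        rw [← hr]
        have hInv' : pvInv r := pv_inv_of_suffix ⟨pvL1, hr.symm ▸ rfl⟩ hInv
        have hlen : r.length ≤ n := by
          have hlr := congrArg List.length hr
          simp [pvL1] at hlr
          have hn' : t.length + 1 ≤ n + 1 := by simpa using hn
          omega
        unfold pvComp
        rw [pv_replace_pos _ _ _ ne1 (by rw [List.isPrefixOf_iff_prefix]; exact ⟨r, rfl⟩)]
        rw [List.drop_left]
        rw [pv_replace_block pvL2 pvR2 ne2 pvR1 (by decide),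
            pv_replace_block pvL3 pvR3 ne3 pvR1 (by decide),
            pv_replace_block pvL4 [] ne4 pvR1 (by decide),
            pv_replace_block pvL5 [] ne5 pvR1 (by decide)]
        rw [pv_scan_tok1]
        rw [← pvComp]
        rw [ih r hlen hInv']
      · by_cases hp2 : pvL2.isPrefixOf (c :: t)
        · obtain ⟨r, hr⟩ := List.isPrefixOf_iff_prefix.mp hp2
          rw [← hr]
          have hInv' : pvInv r := pv_inv_of_suffix ⟨pvL2, hr.symm ▸ rfl⟩ hInv
          have hlen : r.length ≤ n := by
            have hlr := congrArg List.length hr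
            simp [pvL2] at hlr
            have hn' : t.length + 1 ≤ n + 1 := by simpa using hn
            omega
          unfold pvComp
          rw [pv_replace_block pvL1 pvR1 ne1 pvL2 (by decide)]
          rw [pv_replace_pos _ _ _ ne2 (by rw [List.isPrefixOf_iff_prefix]; exact ⟨_, rfl⟩)]
          rw [List.drop_left]
          rw [pv_replace_block pvL3 pvR3 ne3 pvR2 (by decide),
              pv_replace_block pvL4 [] ne4 pvR2 (by decide),
              pv_replace_block pvL5 [] ne5 pvR2 (by decide)]
          rw [pv_scan_tok2]
          rw [← pvComp]
          rw [ih r hlen hInv']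
        · by_cases hp3 : pvL3.isPrefixOf (c :: t)
          · obtain ⟨r, hr⟩ := List.isPrefixOf_iff_prefix.mp hp3
            rw [← hr]
            have hInv' : pvInv r := pv_inv_of_suffix ⟨pvL3, hr.symm ▸ rfl⟩ hInv
            have hlen : r.length ≤ n := by
              have hlr := congrArg List.length hr
              simp [pvL3] at hlr
              have hn' : t.length + 1 ≤ n + 1 := by simpa using hn
              omega
            unfold pvComp
            rw [pv_replace_block pvL1 pvR1 ne1 pvL3 (by decide),
                pv_replace_block pvL2 pvR2 ne2 pvL3 (by decide)]
            rw [pv_replace_pos _ _ _ ne3 (by rw [List.isPrefixOf_iff_prefix]; exact ⟨_, rfl⟩)]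
            rw [List.drop_left]
            rw [pv_replace_block pvL4 [] ne4 pvR3 (by decide),
                pv_replace_block pvL5 [] ne5 pvR3 (by decide)]
            rw [pv_scan_tok3]
            rw [← pvComp]
            rw [ih r hlen hInv']
          · by_cases hp4 : pvL4.isPrefixOf (c :: t)
            · obtain ⟨r, hr⟩ := List.isPrefixOf_iff_prefix.mp hp4
              rw [← hr]
              have hInv' : pvInv r := pv_inv_of_suffix ⟨pvL4, hr.symm ▸ rfl⟩ hInv
              have hlen : r.length ≤ n := by
                have hlr := congrArg List.length hr
                simp [pvL4] at hlr
                have hn' : t.length + 1 ≤ n + 1 := by simpa using hn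
                omega
              unfold pvComp
              rw [pv_replace_block pvL1 pvR1 ne1 pvL4 (by decide),
                  pv_replace_block pvL2 pvR2 ne2 pvL4 (by decide),
                  pv_replace_block pvL3 pvR3 ne3 pvL4 (by decide)]
              rw [pv_replace_pos _ _ _ ne4 (by rw [List.isPrefixOf_iff_prefix]; exact ⟨_, rfl⟩)]
              rw [List.drop_left, List.nil_append]
              rw [pv_scan_tok4]
              rw [← pvComp]
              rw [ih r hlen hInv']
            · by_cases hp5 : pvL5.isPrefixOf (c :: t)
              · obtain ⟨r, hr⟩ := List.isPrefixOf_iff_prefix.mp hp5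
                rw [← hr]
                have hInv' : pvInv r := pv_inv_of_suffix ⟨pvL5, hr.symm ▸ rfl⟩ hInv
                have hlen : r.length ≤ n := by
                  have hlr := congrArg List.length hr
                  simp [pvL5] at hlr
                  have hn' : t.length + 1 ≤ n + 1 := by simpa using hn
                  omega
                unfold pvComp
                rw [pv_replace_block pvL1 pvR1 ne1 pvL5 (by decide),
                    pv_replace_block pvL2 pvR2 ne2 pvL5 (by decide),
                    pv_replace_block pvL3 pvR3 ne3 pvL5 (by decide),
                    pv_replace_block pvL4 [] ne4 pvL5 (by decide)]
                rw [pv_replace_pos _ _ _ ne5 (by rw [List.isPrefixOf_iff_prefix]; exact ⟨_, rfl⟩)]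
                rw [List.drop_left, List.nil_append]
                rw [pv_scan_tok5]
                rw [← pvComp]
                rw [ih r hlen hInv']
              · rw [pv_comp_cons c t hInv hp1 hp2 hp3 hp4 hp5,
                    pv_scan_neg c t hp1 hp2 hp3 hp4 hp5,
                    ih t (by simpa using hn) (pv_inv_of_suffix (List.suffix_cons c t) hInv)]

-- ===== VERDICT (by name: the statement is the Claim_ definition above) =====
theorem patch_tracker_parameters_spec : Claim_equal_patch_tracker_parameters := by
  intro xml hdom hpre
  unfold Spec_patch_tracker_parameters patch_tracker_parameters_alt
  have e1 : ("<string>" ++ "SCM_PROVIDER" ++ "</string>") = "<string>SCM_PROVIDER</string>" := by decide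
  have e2 : ("<string>" ++ "SCM_URL" ++ "</string>") = "<string>SCM_URL</string>" := by decide
  have e3 : ("<string>" ++ "LLM_PROVIDER" ++ "</string>") = "<string>LLM_PROVIDER</string>" := by decide
  have e4 : ("<string>" ++ "SCM_PROVIDER_OVERRIDE" ++ "</string>") = "<string>SCM_PROVIDER_OVERRIDE</string>" := by decide
  have e5 : ("<string>" ++ "SCM_URL_OVERRIDE" ++ "</string>") = "<string>SCM_URL_OVERRIDE</string>" := by decide
  have e6 : ("<string>" ++ "LLM_PROVIDER_OVERRIDE" ++ "</string>") = "<string>LLM_PROVIDER_OVERRIDE</string>" := by decide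
  have hA : patch_tracker_parameters xml = String.ofList (pvComp xml.toList) := by
    unfold patch_tracker_parameters
    simp only [List.foldl]
    rw [e1, e2, e3, e4, e5, e6]
    simp only [PySem.Str.replace, String.toList_ofList]
    rfl
  rw [hA, pv_main xml.toList.length xml.toList le_rfl hpre]
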